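-- pv_equiv track=rewrite | github.com/hyeonhye126/codingtest_hyeonhye | 프로그래머스/0/120853. 컨트롤 제트/컨트롤 제트.py | solution
-- ===== SOURCE A (Python) =====
-- def solution(s):
--     num_list = []
--     for c in s.split():
--         if c == 'Z':
--             num_list.pop(-1)
--         else:
--             num_list.append(int(c))
--     return sum(num_list)
-- ===== SOURCE B (Python) =====
-- def solution(s):
--     skip = 0
--     total = 0
--     for token in reversed(s.split()):
--         if token == 'Z':
--             skip += 1
--         else:
--             n = int(token)
--             if skip:
--                 skip -= 1
--             else:
--                 total += n
--     return total
-- ===== Notes on version B (the rewrite author's own statement) =====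
-- stated objective: alternative
-- what changed: B walks the tokens in reverse with an integer skip counter and a running total instead of building a stack, popping it and summing it at the end; no list is ever materialised.
-- outside the precondition, e.g. on solution('Z'): A raises IndexError, B returns 0
import Mathlib
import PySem

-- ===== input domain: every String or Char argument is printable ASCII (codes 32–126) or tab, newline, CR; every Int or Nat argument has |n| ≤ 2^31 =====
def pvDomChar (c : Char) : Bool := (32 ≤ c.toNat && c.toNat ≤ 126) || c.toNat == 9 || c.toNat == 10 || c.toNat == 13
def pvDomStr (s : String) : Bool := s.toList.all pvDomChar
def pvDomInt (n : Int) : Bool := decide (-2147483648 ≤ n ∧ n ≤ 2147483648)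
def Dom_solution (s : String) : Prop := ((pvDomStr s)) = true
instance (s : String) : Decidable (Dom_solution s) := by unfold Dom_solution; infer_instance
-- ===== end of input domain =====

-- B replaces A's stack (append / pop / final sum) by a single reverse pass with a skip
-- counter and a running total (objective: alternative decomposition, O(1) extra space).

-- ===== PORT A =====
-- loop body of A: push int(c), or pop the last element on 'Z'; none = exception raised
def stepA (acc : Option (List Int)) (c : String) : Option (List Int) :=
  match acc with
  | none => none
  | some num_list =>
    if c = "Z" then
      match PySem.List.pop? num_list (-1) with
      | none => none
      | some (_, rest) => some rest
    else
      match PySem.Int.ofStr? c with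
      | none => none
      | some n => some (num_list ++ [n])

def solution (s : String) : Int :=
  match (PySem.Str.split₀ s).foldl stepA (some []) with
  | none => 0          -- unreachable under Pre_solution (A raises there)
  | some num_list => num_list.sum

-- ===== PORT B =====
-- loop body of B: state (skip, total); 'Z' bumps skip, a number is either skipped or added
def stepB (acc : Option (Nat × Int)) (token : String) : Option (Nat × Int) :=
  match acc with
  | none => none
  | some (skip, total) =>
    if token = "Z" then some (skip + 1, total)
    else
      match PySem.Int.ofStr? token with
      | none => none
      | some n => if skip ≠ 0 then some (skip - 1, total) else some (skip, total + n)

def solution_alt (s : String) : Int :=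
  match (PySem.Str.split₀ s).reverse.foldl stepB (some (0, 0)) with
  | none => 0          -- unreachable: B raises ValueError there, outside Pre_solution
  | some (_, total) => total

-- ===== PRECONDITION & SPEC =====
-- Pre_: every token is 'Z' or a valid int literal (else int() raises ValueError) and no
-- prefix holds more 'Z's than numbers (else pop(-1) raises IndexError); exactly A's domain.
def Pre_solution (s : String) : Prop :=
  (∀ t ∈ PySem.Str.split₀ s, t = "Z" ∨ (PySem.Int.ofStr? t).isSome = true) ∧
  (∀ n ≤ (PySem.Str.split₀ s).length,
    ((PySem.Str.split₀ s).take n).countP (· == "Z")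
      ≤ ((PySem.Str.split₀ s).take n).countP (· != "Z"))
instance (s : String) : Decidable (Pre_solution s) := by unfold Pre_solution; infer_instance

def pvWitness_solution : String := "1 2 Z 3"

def Spec_solution (s : String) (out : Int) : Prop := out = solution_alt s
instance (s : String) (out : Int) : Decidable (Spec_solution s out) := by unfold Spec_solution; infer_instance

-- ===== CLAIM (what is proved, stated in full; the proofs are below) =====
def Claim_equal_solution : Prop := ∀ (s : String), Dom_solution s → Pre_solution s → Spec_solution s (solution s)

-- ===== LEMMAS AND PROOFS =====

-- The coupling invariant between A's stack fold and B's reverse (skip, total) fold.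
lemma main_invariant (ts : List String) : ∀ (st : List Int),
    (∀ t ∈ ts, t = "Z" ∨ (PySem.Int.ofStr? t).isSome = true) →
    (∀ n ≤ ts.length,
      ((ts.take n).countP (· == "Z")) ≤ st.length + ((ts.take n).countP (· != "Z"))) →
    ∃ st' skip total,
      ts.foldl stepA (some st) = some st' ∧
      ts.reverse.foldl stepB (some (0, 0)) = some (skip, total) ∧
      skip ≤ st.length ∧
      st'.sum = (st.take (st.length - skip)).sum + total := by
  induction ts with
  | nil =>
    intro st _ _
    exact ⟨st, 0, 0, rfl, rfl, Nat.zero_le _, by simp⟩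
  | cons x ts ih =>
    intro st hval hpre
    have hxval := hval x (List.mem_cons_self ..)
    by_cases hx : x = "Z"
    · -- 'Z' pops the last element; st is nonempty by hpre at n = 1
      have hst1 : 1 ≤ st.length := by
        have := hpre 1 (by simp)
        simpa [hx, List.countP_cons] using this
      obtain hnil | ⟨ys, y, hst⟩ := st.eq_nil_or_concat
      · rw [hnil] at hst1; simp at hst1
      rw [List.concat_eq_append] at hst
      subst hst
      obtain ⟨st', skip', total', hA, hB, hskip, hsum⟩ := ih ys
        (fun t ht => hval t (List.mem_cons_of_mem _ ht))
        (by
          intro n hn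
          have := hpre (n + 1) (by simpa using hn)
          simp only [List.take_succ_cons, List.countP_cons, hx, List.length_append,
            List.length_cons, List.length_nil] at this
          simp at this
          omega)
      refine ⟨st', skip' + 1, total', ?_, ?_, by simpa using hskip, ?_⟩
      · simpa [List.foldl_cons, stepA, hx, PySem.List.pop?_last] using hA
      · rw [List.reverse_cons, List.foldl_append, hB]
        simp [stepB, hx]
      · have hk : (ys ++ [y]).length - (skip' + 1) = ys.length - skip' := by simp
        have htake : (ys ++ [y]).take (ys.length - skip') = ys.take (ys.length - skip') :=
          List.take_append_of_le_length (by omega)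
        rw [hsum, hk, htake]
    · -- a number: pushed on st in A, skipped or added in B
      obtain ⟨n, hn⟩ : ∃ n, PySem.Int.ofStr? x = some n := by
        rcases hxval with h | h
        · exact absurd h hx
        · exact Option.isSome_iff_exists.mp h
      have hxz : (x == "Z") = false := by simpa using hx
      have hxnz : (x != "Z") = true := by simpa using hx
      obtain ⟨st', skip', total', hA, hB, hskip, hsum⟩ := ih (st ++ [n])
        (fun t ht => hval t (List.mem_cons_of_mem _ ht))
        (by
          intro m hm
          have := hpre (m + 1) (by simpa using hm)
          simp only [List.take_succ_cons, List.countP_cons, hxz, hxnz] at this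
          simp only [List.length_append, List.length_cons, List.length_nil]
          simp at this
          omega)
      have hA' : (x :: ts).foldl stepA (some st) = some st' := by
        simpa [List.foldl_cons, stepA, hx, hn] using hA
      have hlen : (st ++ [n]).length = st.length + 1 := by simp
      rw [hlen] at hskip hsum
      by_cases hsk : skip' = 0
      · subst hsk
        refine ⟨st', 0, total' + n, hA', ?_, Nat.zero_le _, ?_⟩
        · rw [List.reverse_cons, List.foldl_append, hB]
          simp [stepB, hx, hn]
        · rw [hsum]
          simp [List.take_of_length_le, List.sum_append]
          ring
      · refine ⟨st', skip' - 1, total', hA', ?_, by omega, ?_⟩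
        · rw [List.reverse_cons, List.foldl_append, hB]
          simp [stepB, hx, hn, hsk]
        · have hk : st.length + 1 - skip' = st.length - (skip' - 1) := by omega
          have htake : (st ++ [n]).take (st.length - (skip' - 1))
              = st.take (st.length - (skip' - 1)) :=
            List.take_append_of_le_length (by omega)
          rw [hsum, hk, htake]

-- ===== VERDICT (by name: the statement is the Claim_ definition above) =====
theorem solution_spec : Claim_equal_solution := by
  intro s _ hpre
  obtain ⟨hval, hbal⟩ := hpre
  obtain ⟨st', skip, total, hA, hB, hskip, hsum⟩ :=
    main_invariant (PySem.Str.split₀ s) [] hval (by simpa using hbal)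
  have hskip0 : skip = 0 := Nat.le_zero.mp hskip
  subst hskip0
  unfold Spec_solution solution solution_alt
  rw [hA, hB]
  simpa using hsum
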